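-- pv_equiv track=rewrite | github.com/danya02/slon-winter-2018-intro | 125mm-caliber/solution.py | split_int
-- ===== SOURCE A (Python) =====
-- def split_int(n: int) -> (bool, (int, int, int, int)):
--     """
--     Split the given int into pieces of 3 registers.
--     """
--     if abs(n) > 999999999999:
--         raise OverflowError('number too large or too small')
--     if not isinstance(n, int):
--         raise TypeError('number must be integer')
--     sign = n < 0
--     n = abs(n)
--     return sign, tuple([int(i) for i in [str(n).rjust(12, "0")[i:i + 3] for i in range(0, 12, 3)]])
-- ===== SOURCE B (Python) =====
-- def split_int(n: int) -> (bool, (int, int, int, int)):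
--     """
--     Split the given int into pieces of 3 registers.
--     """
--     if abs(n) > 999999999999:
--         raise OverflowError('number too large or too small')
--     if not isinstance(n, int):
--         raise TypeError('number must be integer')
--     sign = n < 0
--     n = abs(n)
--     return sign, (n // 1_000_000_000 % 1000,
--                   n // 1_000_000 % 1000,
--                   n // 1_000 % 1000,
--                   n % 1000)
-- ===== Notes on version B (the rewrite author's own statement) =====
-- stated objective: idiomatic
-- what changed: B extracts the four three-digit register groups arithmetically (repeated division and remainder in base one thousand) instead of zero-padding the decimal string and parsing three-character slices back to int.
import Mathlib
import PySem

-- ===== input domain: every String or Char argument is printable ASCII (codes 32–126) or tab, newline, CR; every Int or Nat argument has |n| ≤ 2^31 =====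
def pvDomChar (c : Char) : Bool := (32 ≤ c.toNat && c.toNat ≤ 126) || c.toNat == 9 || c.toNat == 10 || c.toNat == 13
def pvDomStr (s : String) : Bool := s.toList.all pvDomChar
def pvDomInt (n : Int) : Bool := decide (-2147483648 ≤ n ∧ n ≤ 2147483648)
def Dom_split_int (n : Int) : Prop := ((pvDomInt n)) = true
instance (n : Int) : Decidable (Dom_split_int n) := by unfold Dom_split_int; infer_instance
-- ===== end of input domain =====

-- B extracts the four 3-digit groups arithmetically (base-1000 divmod) instead of zero-padding
-- the decimal string and parsing 3-character slices back to int (objective: idiomatic).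

-- ===== PORT A =====
-- s.rjust(w, "0"): exact for left zero-padding
def pyRjust0 (cs : List Char) (w : Nat) : List Char :=
  List.replicate (w - cs.length) '0' ++ cs

def split_int (n : Int) : Bool × (Int × Int × Int × Int) :=
  if 999999999999 < |n| then (false, (0, 0, 0, 0))  -- Python: raise OverflowError (excluded by Pre_)
  else
    -- isinstance(n, int) is always true under the type convention
    let sign : Bool := decide (n < 0)
    let m : Int := |n|
    let padded : List Char := pyRjust0 (PySem.Int.toChars m) 12
    let slices : List (List Char) :=
      (PySem.List.pyRange 0 12 3).map (fun i => PySem.List.slice padded (some i) (some (i + 3)))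
    -- int(g) never raises here (g is three decimal digits), so the .getD 0 default is never used
    let ints : List Int := slices.map (fun g => (PySem.Int.ofChars? g).getD 0)
    match ints with
    | [a, b, c, d] => (sign, (a, b, c, d))
    | _ => (sign, (0, 0, 0, 0))

-- ===== PORT B =====
def split_int_alt (n : Int) : Bool × (Int × Int × Int × Int) :=
  if 999999999999 < |n| then (false, (0, 0, 0, 0))  -- Python: raise OverflowError (excluded by Pre_)
  else
    let sign : Bool := decide (n < 0)
    let m : Int := |n|
    (sign, (PySem.Int.mod (PySem.Int.floordiv m 1000000000) 1000,
            PySem.Int.mod (PySem.Int.floordiv m 1000000) 1000,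
            PySem.Int.mod (PySem.Int.floordiv m 1000) 1000,
            PySem.Int.mod m 1000))

-- ===== PRECONDITION & SPEC =====
-- Pre_ excludes exactly the inputs where A raises OverflowError (|n| > 999999999999).
def Pre_split_int (n : Int) : Prop := |n| ≤ 999999999999
instance (n : Int) : Decidable (Pre_split_int n) := by unfold Pre_split_int; infer_instance
def pvWitness_split_int : Int := 123456789

def Spec_split_int (n : Int) (out : Bool × (Int × Int × Int × Int)) : Prop := out = split_int_alt n
instance (n : Int) (out : Bool × (Int × Int × Int × Int)) : Decidable (Spec_split_int n out) := by unfold Spec_split_int; infer_instance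

-- ===== CLAIM (what is proved, stated in full; the proofs are below) =====
def Claim_equal_split_int : Prop := ∀ (n : Int), Dom_split_int n → Pre_split_int n → Spec_split_int n (split_int n)

-- ===== LEMMAS AND PROOFS =====

-- str(m) for m : Nat, as structural recursion on the decimal digits
def repChars (m : Nat) : List Char :=
  if m < 10 then [Nat.digitChar m]
  else repChars (m / 10) ++ [Nat.digitChar (m % 10)]
termination_by m
decreasing_by exact Nat.div_lt_self (by omega) (by omega)

theorem toDigitsCore_eq_repChars :
    ∀ (fuel n : Nat) (acc : List Char), n < fuel →
      Nat.toDigitsCore 10 fuel n acc = repChars n ++ acc := by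
  intro fuel
  induction fuel with
  | zero => intro n acc h; omega
  | succ f ih =>
    intro n acc h
    rw [Nat.toDigitsCore]
    by_cases h10 : n < 10
    · have h0 : n / 10 = 0 := Nat.div_eq_of_lt h10
      simp [h0, repChars, Nat.mod_eq_of_lt h10, h10]
    · have hne : n / 10 ≠ 0 := by omega
      simp only [hne, if_false]
      rw [ih (n / 10) _ (by omega)]
      conv_rhs => rw [repChars]
      simp [h10]

theorem toDigits_eq_repChars (m : Nat) : Nat.toDigits 10 m = repChars m := by
  rw [Nat.toDigits, toDigitsCore_eq_repChars m.succ m [] (Nat.lt_succ_self m)]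
  simp

-- the w decimal digits of m, most significant first
def digitsList (w m : Nat) : List Char :=
  (List.range w).map (fun k => Nat.digitChar (m / 10 ^ (w - 1 - k) % 10))

theorem digitsList_zero_val (w : Nat) : digitsList w 0 = List.replicate w '0' := by
  have hf : (fun k => Nat.digitChar (0 / 10 ^ (w - 1 - k) % 10)) = (fun _ : Nat => '0') := by
    funext k; simp [Nat.digitChar]
  rw [digitsList, hf, List.map_const', List.length_range]

theorem digitsList_succ (w m : Nat) :
    digitsList (w + 1) m = digitsList w (m / 10) ++ [Nat.digitChar (m % 10)] := by
  rw [digitsList, digitsList, List.range_succ, List.map_append]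
  congr 1
  · apply List.map_congr_left
    intro k hk
    rw [List.mem_range] at hk
    have h1 : w + 1 - 1 - k = (w - 1 - k) + 1 := by omega
    rw [h1, pow_succ]
    rw [Nat.div_div_eq_div_mul m 10 (10 ^ (w - 1 - k))]
    ring_nf
  · simp

theorem pad_eq_digitsList :
    ∀ (w m : Nat), m < 10 ^ (w + 1) →
      List.replicate ((w + 1) - (repChars m).length) '0' ++ repChars m = digitsList (w + 1) m := by
  intro w
  induction w with
  | zero =>
    intro m hm
    have h10 : m < 10 := by omega
    rw [repChars]; simp [h10]
    rw [digitsList]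
    simp [Nat.mod_eq_of_lt h10]
  | succ v ih =>
    intro m hm
    rw [digitsList_succ]
    by_cases h10 : m < 10
    · have hd : m / 10 = 0 := Nat.div_eq_of_lt h10
      rw [repChars]
      simp only [h10, if_pos]
      rw [hd, digitsList_zero_val, Nat.mod_eq_of_lt h10]
      simp
    · rw [repChars, if_neg h10]
      have hlt : m / 10 < 10 ^ (v + 1) := by
        rw [Nat.div_lt_iff_lt_mul (by omega)]
        calc m < 10 ^ (v + 1 + 1) := hm
          _ = 10 ^ (v + 1) * 10 := by ring
      rw [← ih (m / 10) hlt]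
      simp only [List.length_append, List.length_singleton]
      have : v + 1 + 1 - ((repChars (m / 10)).length + 1) = v + 1 - (repChars (m / 10)).length := by omega
      rw [this, List.append_assoc]

theorem ofChars?_three_digits :
    ∀ a < 10, ∀ b < 10, ∀ c < 10,
      PySem.Int.ofChars? [Nat.digitChar a, Nat.digitChar b, Nat.digitChar c]
        = some ((100 * a + 10 * b + c : Nat) : Int) := by
  decide

theorem digitsList_twelve (m : Nat) :
    digitsList 12 m =
      [Nat.digitChar (m / 10 ^ 11 % 10), Nat.digitChar (m / 10 ^ 10 % 10),
       Nat.digitChar (m / 10 ^ 9 % 10), Nat.digitChar (m / 10 ^ 8 % 10),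
       Nat.digitChar (m / 10 ^ 7 % 10), Nat.digitChar (m / 10 ^ 6 % 10),
       Nat.digitChar (m / 10 ^ 5 % 10), Nat.digitChar (m / 10 ^ 4 % 10),
       Nat.digitChar (m / 10 ^ 3 % 10), Nat.digitChar (m / 10 ^ 2 % 10),
       Nat.digitChar (m / 10 ^ 1 % 10), Nat.digitChar (m % 10)] := by
  simp [digitsList, List.range_succ]

theorem slice_nat_triple (L : List Char) (a b : Nat) :
    PySem.List.slice L (some (a : Int)) (some ((a : Int) + (b : Int))) = (L.drop a).take b := by
  rw [← Nat.cast_add, PySem.List.slice_natCast]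
  congr 1
  omega

theorem split_int_spec_aux (n : Int) (h : ¬ 999999999999 < |n|) :
    split_int n = split_int_alt n := by
  simp only [split_int, split_int_alt, if_neg h]
  have habs : |n| = (n.natAbs : Int) := Int.abs_eq_natAbs n
  rw [habs] at h
  have hmlt : n.natAbs < 10 ^ 12 := by norm_num; omega
  set m := n.natAbs with hm
  have hchars : PySem.Int.toChars |n| = repChars m := by
    rw [habs]
    unfold PySem.Int.toChars
    rw [if_neg (by omega : ¬ ((m : Int) < 0))]
    rw [Int.toNat_natCast, toDigits_eq_repChars]
  have hpad : pyRjust0 (PySem.Int.toChars |n|) 12 = digitsList 12 m := by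
    rw [hchars]
    unfold pyRjust0
    exact pad_eq_digitsList 11 m hmlt
  rw [hpad, digitsList_twelve]
  have hrange : PySem.List.pyRange 0 12 3 = [(0 : Int), 3, 6, 9] := by decide
  rw [hrange]
  simp only [List.map_cons, List.map_nil]
  rw [show ((0 : Int)) = ((0 : Nat) : Int) from rfl,
      show ((3 : Int)) = ((3 : Nat) : Int) from rfl,
      show ((6 : Int)) = ((6 : Nat) : Int) from rfl,
      show ((9 : Int)) = ((9 : Nat) : Int) from rfl]
  rw [slice_nat_triple, slice_nat_triple, slice_nat_triple, slice_nat_triple]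
  simp only [List.drop, List.take]
  rw [ofChars?_three_digits _ (Nat.mod_lt _ (by norm_num)) _ (Nat.mod_lt _ (by norm_num)) _ (Nat.mod_lt _ (by norm_num)),
      ofChars?_three_digits _ (Nat.mod_lt _ (by norm_num)) _ (Nat.mod_lt _ (by norm_num)) _ (Nat.mod_lt _ (by norm_num)),
      ofChars?_three_digits _ (Nat.mod_lt _ (by norm_num)) _ (Nat.mod_lt _ (by norm_num)) _ (Nat.mod_lt _ (by norm_num)),
      ofChars?_three_digits _ (Nat.mod_lt _ (by norm_num)) _ (Nat.mod_lt _ (by norm_num)) _ (Nat.mod_lt _ (by norm_num))]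
  simp only [Option.getD_some]
  rw [habs]
  simp only [PySem.Int.mod_eq_emod_of_pos (show (0:Int) < 1000 by norm_num),
             PySem.Int.floordiv_eq_ediv_of_pos (show (0:Int) < 1000000000 by norm_num),
             PySem.Int.floordiv_eq_ediv_of_pos (show (0:Int) < 1000000 by norm_num),
             PySem.Int.floordiv_eq_ediv_of_pos (show (0:Int) < 1000 by norm_num)]
  simp only [Prod.mk.injEq]
  refine ⟨trivial, ?_, ?_, ?_, ?_⟩ <;> (norm_num; omega)

-- ===== VERDICT (by name: the statement is the Claim_ definition above) =====
theorem split_int_spec : Claim_equal_split_int := by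
  intro n _ hpre
  unfold Spec_split_int
  exact split_int_spec_aux n (by unfold Pre_split_int at hpre; omega)
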